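-- pv_equiv track=rewrite | github.com/rinagalperin/biomedical_nel | training_data/main.py | get_window_for_candidate
-- ===== SOURCE A (Python) =====
-- def get_phrase_from_text_by_offsets(text, start_word_offset, end_word_offset):
--     word_count = end_word_offset - start_word_offset + 1
--     match_phrase = []
--
--     i = 0
--     while i < word_count:
--         if 0 <= start_word_offset + i < len(text):
--             match_phrase.append(text[start_word_offset + i])
--         i += 1
--
--     return ' '.join(match_phrase)
--
-- def get_window_for_candidate(post_txt, start_word_offset, end_word_offset, window_size=3, pad=False):
--     post_txt = post_txt.split(' ')
--     post_txt = [w for w in post_txt if len(w)]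
--     match_phrase = get_phrase_from_text_by_offsets(post_txt, start_word_offset, end_word_offset)
--     ans = [match_phrase]
--
--     i = 1
--     while window_size > 0:
--         # take one word before the match phrase
--         if 0 <= start_word_offset - i < len(post_txt):
--             ans.insert(0, post_txt[start_word_offset - i])
--         # if doesn't exist - pad
--         elif pad:
--             ans.insert(0, '*')
--
--         # take one word after the match phrase
--         if 0 <= end_word_offset + i < len(post_txt):
--             ans.insert(len(ans), post_txt[end_word_offset + i])
--         # if doesn't exist - pad
--         elif pad:
--             ans.insert(len(ans), '*')
--         i += 1
--         window_size -= 1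
--
--     # returns:
--     # ['שלום', 'אני', 'חולה', 'סוכרת', 'ורציתי']
--     # as a sentence where 'חולה' is the match word
--     return ' '.join(ans)
-- ===== SOURCE B (Python) =====
-- def get_window_for_candidate(post_txt, start_word_offset, end_word_offset, window_size=3, pad=False):
--     # Loop-free: every piece of the window is a contiguous index interval, so it is
--     # extracted with one clamped slice; pad counts are computed arithmetically.
--     words = [w for w in post_txt.split(' ') if len(w)]
--     n = len(words)
--
--     def clip(x):
--         return min(max(x, 0), n)
--
--     def segment(lo, hi):
--         seg = words[clip(lo):clip(hi)]
--         if pad: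
--             left = max(0, min(hi, 0) - lo)
--             right = max(0, hi - max(lo, n))
--             seg = ['*'] * left + seg + ['*'] * right
--         return seg
--
--     match_phrase = ' '.join(words[clip(start_word_offset):clip(end_word_offset + 1)])
--     before = segment(start_word_offset - window_size, start_word_offset)
--     after = segment(end_word_offset + 1, end_word_offset + 1 + window_size)
--     return ' '.join(before + [match_phrase] + after)
-- ===== Notes on version B (the rewrite author's own statement) =====
-- stated objective: faster
-- what changed: Replaces A's interleaved insert-at-front/append window loop and per-index match-phrase loop with a loop-free formulation: each window piece is a contiguous index interval, extracted by one clamped list slice, with the '*' pad counts computed arithmetically from the interval bounds.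
import Mathlib
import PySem

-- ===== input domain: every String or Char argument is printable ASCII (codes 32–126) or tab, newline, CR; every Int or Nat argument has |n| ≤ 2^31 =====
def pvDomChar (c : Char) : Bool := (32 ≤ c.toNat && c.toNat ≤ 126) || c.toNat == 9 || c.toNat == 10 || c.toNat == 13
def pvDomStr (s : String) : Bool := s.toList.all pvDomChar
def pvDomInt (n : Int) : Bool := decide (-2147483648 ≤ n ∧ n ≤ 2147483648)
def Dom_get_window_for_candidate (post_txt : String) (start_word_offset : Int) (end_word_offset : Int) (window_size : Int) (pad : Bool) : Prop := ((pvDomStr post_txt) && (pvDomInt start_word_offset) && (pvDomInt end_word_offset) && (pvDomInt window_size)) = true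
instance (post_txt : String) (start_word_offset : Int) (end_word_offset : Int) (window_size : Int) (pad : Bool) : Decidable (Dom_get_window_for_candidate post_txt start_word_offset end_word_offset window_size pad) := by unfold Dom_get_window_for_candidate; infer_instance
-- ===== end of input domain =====

-- B replaces A's interleaved insert-at-front/append window loop (and the per-index
-- match-phrase loop) by a loop-free formulation: each window piece is a contiguous
-- index interval, extracted by one clamped slice, with the '*' pad counts computed
-- arithmetically from the interval bounds; objective: faster (no per-word loop, no quadratic insert-at-front).

-- ===== PORT A =====
-- while i < word_count: append text[start+i] if in range
def pvA_phraseLoop (text : List String) (s : Int) (wc : Int) (i : Int) (acc : List String) : List String :=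
  if _h : i < wc then
    pvA_phraseLoop text s wc (i + 1)
      (if 0 ≤ s + i ∧ s + i < (text.length : Int) then acc ++ [PySem.List.pyGetD text (s + i) ""] else acc)
  else acc
termination_by (wc - i).toNat
decreasing_by omega

def get_phrase_from_text_by_offsets (text : List String) (s : Int) (e : Int) : String :=
  PySem.Str.join " " (pvA_phraseLoop text s (e - s + 1) 0 [])

-- while window_size > 0: insert before at front, append after at back
def pvA_winLoop (post : List String) (s : Int) (e : Int) (pad : Bool) (ws : Int) (i : Int) (ans : List String) : List String :=
  if _h : ws > 0 then
    let ans1 := if 0 ≤ s - i ∧ s - i < (post.length : Int) then PySem.List.pyGetD post (s - i) "" :: ans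
                else if pad then "*" :: ans else ans
    let ans2 := if 0 ≤ e + i ∧ e + i < (post.length : Int) then ans1 ++ [PySem.List.pyGetD post (e + i) ""]
                else if pad then ans1 ++ ["*"] else ans1
    pvA_winLoop post s e pad (ws - 1) (i + 1) ans2
  else ans
termination_by ws.toNat
decreasing_by omega

def get_window_for_candidate (post_txt : String) (start_word_offset : Int) (end_word_offset : Int) (window_size : Int) (pad : Bool) : String :=
  let post := ((PySem.Str.split? post_txt " ").getD []).filter (fun w => PySem.Str.len w != 0)
  let match_phrase := get_phrase_from_text_by_offsets post start_word_offset end_word_offset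
  PySem.Str.join " " (pvA_winLoop post start_word_offset end_word_offset pad window_size 1 [match_phrase])

-- ===== PORT B =====
-- min(max(x, 0), n)
def pvB_clip (n : Int) (x : Int) : Int := min (max x 0) n

-- words[clip(lo):clip(hi)], plus '*' pads counted arithmetically when pad
def pvB_segment (words : List String) (pad : Bool) (lo : Int) (hi : Int) : List String :=
  let seg := PySem.List.slice words (some (pvB_clip (words.length : Int) lo)) (some (pvB_clip (words.length : Int) hi))
  if pad then
    PySem.List.pyRepeat ["*"] (max 0 (min hi 0 - lo)) ++ seg ++
      PySem.List.pyRepeat ["*"] (max 0 (hi - max lo (words.length : Int)))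
  else seg

def get_window_for_candidate_alt (post_txt : String) (start_word_offset : Int) (end_word_offset : Int) (window_size : Int) (pad : Bool) : String :=
  let words := ((PySem.Str.split? post_txt " ").getD []).filter (fun w => PySem.Str.len w != 0)
  let n : Int := (words.length : Int)
  let match_phrase := PySem.Str.join " "
    (PySem.List.slice words (some (pvB_clip n start_word_offset)) (some (pvB_clip n (end_word_offset + 1))))
  let before := pvB_segment words pad (start_word_offset - window_size) start_word_offset
  let after := pvB_segment words pad (end_word_offset + 1) (end_word_offset + 1 + window_size)
  PySem.Str.join " " (before ++ [match_phrase] ++ after)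

-- ===== PRECONDITION & SPEC =====
def Spec_get_window_for_candidate (post_txt : String) (start_word_offset : Int) (end_word_offset : Int) (window_size : Int) (pad : Bool) (out : String) : Prop := out = get_window_for_candidate_alt post_txt start_word_offset end_word_offset window_size pad
instance (post_txt : String) (start_word_offset : Int) (end_word_offset : Int) (window_size : Int) (pad : Bool) (out : String) : Decidable (Spec_get_window_for_candidate post_txt start_word_offset end_word_offset window_size pad out) := by unfold Spec_get_window_for_candidate; infer_instance

-- ===== CLAIM (what is proved, stated in full; the proofs are below) =====
def Claim_equal_get_window_for_candidate : Prop := ∀ (post_txt : String) (start_word_offset : Int) (end_word_offset : Int) (window_size : Int) (pad : Bool), Dom_get_window_for_candidate post_txt start_word_offset end_word_offset window_size pad → Spec_get_window_for_candidate post_txt start_word_offset end_word_offset window_size pad (get_window_for_candidate post_txt start_word_offset end_word_offset window_size pad)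

-- ===== LEMMAS AND PROOFS =====

-- the per-index contribution of A's window loop, as an Option
def pvItem (words : List String) (pad : Bool) (j : Int) : Option String :=
  if 0 ≤ j ∧ j < (words.length : Int) then some (PySem.List.pyGetD words j "")
  else if pad then some "*" else none

lemma pvA_winLoop_eq (post : List String) (s e : Int) (pad : Bool) :
    ∀ (n : Nat) (ws : Int), ws.toNat = n → ∀ (i : Int) (ans : List String),
      pvA_winLoop post s e pad ws i ans =
        (PySem.List.pyRange (s - i - ws + 1) (s - i + 1) 1).filterMap (pvItem post pad)
        ++ ans ++
        (PySem.List.pyRange (e + i) (e + i + ws) 1).filterMap (pvItem post pad) := by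
  intro n
  induction n with
  | zero =>
    intro ws hws i ans
    have hle : ws ≤ 0 := by omega
    rw [pvA_winLoop]
    rw [PySem.List.pyRange_one_eq_nil (by omega), PySem.List.pyRange_one_eq_nil (by omega)]
    simp [not_lt.mpr hle]
  | succ m ih =>
    intro ws hws i ans
    have hpos : ws > 0 := by omega
    rw [pvA_winLoop]
    simp only [hpos, dif_pos]
    rw [ih (ws - 1) (by omega) (i + 1)]
    have hb : PySem.List.pyRange (s - i - ws + 1) (s - i + 1) 1 =
        PySem.List.pyRange (s - i - ws + 1) (s - i) 1 ++ [s - i] := by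
      exact PySem.List.pyRange_one_succ_right (by omega)
    have ha : PySem.List.pyRange (e + i) (e + i + ws) 1 =
        (e + i) :: PySem.List.pyRange (e + i + 1) (e + i + ws) 1 :=
      PySem.List.pyRange_one_cons (by omega)
    rw [hb, ha]
    have harg1 : s - (i + 1) - (ws - 1) + 1 = s - i - ws + 1 := by ring
    have harg2 : s - (i + 1) + 1 = s - i := by ring
    have harg3 : e + (i + 1) = e + i + 1 := by ring
    have harg4 : e + i + 1 + (ws - 1) = e + i + ws := by ring
    rw [harg1, harg2, harg3, harg4]
    simp only [List.filterMap_append, List.filterMap_cons, List.filterMap_nil, pvItem]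
    split_ifs <;> simp

lemma pv_phraseLoop_eq (text : List String) (s : Int) (wc : Int) :
    ∀ (n : Nat) (i : Int), (wc - i).toNat = n → ∀ (acc : List String),
      pvA_phraseLoop text s wc i acc =
        acc ++ (PySem.List.pyRange i wc 1).filterMap
          (fun j => if 0 ≤ s + j ∧ s + j < (text.length : Int) then some (PySem.List.pyGetD text (s + j) "") else none) := by
  intro n
  induction n with
  | zero =>
    intro i h acc
    have hle : wc ≤ i := by omega
    rw [pvA_phraseLoop, PySem.List.pyRange_one_eq_nil hle]
    simp [not_lt.mpr hle]
  | succ m ih =>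
    intro i h acc
    have hlt : i < wc := by omega
    rw [pvA_phraseLoop]
    simp only [hlt, dif_pos]
    rw [ih (i + 1) (by omega), PySem.List.pyRange_one_cons hlt]
    simp only [List.filterMap_cons]
    split_ifs <;> simp

lemma pv_match_eq (words : List String) (s e : Int) :
    pvA_phraseLoop words s (e - s + 1) 0 [] =
      (PySem.List.pyRange s (e + 1) 1).filterMap (pvItem words false) := by
  rw [pv_phraseLoop_eq words s (e - s + 1) (e - s + 1 - 0).toNat 0 rfl []]
  rw [PySem.List.pyRange_one, PySem.List.pyRange_one]
  simp only [List.filterMap_map, List.nil_append]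
  have hn : (e - s + 1 - 0).toNat = (e + 1 - s).toNat := by omega
  rw [hn]
  apply List.filterMap_congr
  intro k _
  simp only [Function.comp_apply, pvItem]
  have h1 : s + (0 + (k : Int)) = s + k := by ring
  rw [h1]
  simp

-- filterMap of a constant option over a list
lemma pv_filterMap_const {α : Type} (L : List Int) (o : Option α) :
    L.filterMap (fun _ => o) = (match o with | some c => List.replicate L.length c | none => []) := by
  induction L with
  | nil => cases o <;> simp
  | cons x t ih => cases o <;> simp_all [List.replicate_succ]

-- map of pyGetD over an in-bounds range is a drop/take slice
lemma pv_map_getD_range (words : List String) (a b : Int) (h0 : 0 ≤ a) (hab : a ≤ b)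
    (hb : b ≤ (words.length : Int)) :
    (PySem.List.pyRange a b 1).map (fun j => PySem.List.pyGetD words j "") =
      (words.drop a.toNat).take (b.toNat - a.toNat) := by
  have hsplit := PySem.List.pyRange_one_append a b (words.length : Int) hab hb
  have hfull : (PySem.List.pyRange a (words.length : Int) 1).map (fun j => PySem.List.pyGetD words j "") =
      words.drop a.toNat := PySem.List.map_pyGetD_pyRange' (xs := words) (d := "") (a := a) h0
  rw [hsplit, List.map_append] at hfull
  have hlen : ((PySem.List.pyRange a b 1).map (fun j => PySem.List.pyGetD words j "")).length =
      b.toNat - a.toNat := by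
    rw [List.length_map, PySem.List.length_pyRange_one]; omega
  rw [← hfull, List.take_append_of_le_length (by omega), List.take_of_length_le (by omega)]

-- A's per-index window contribution over one contiguous range IS B's segment
lemma pv_filterMap_pvItem_eq_segment (words : List String) (pad : Bool) (lo hi : Int) :
    (PySem.List.pyRange lo hi 1).filterMap (pvItem words pad) = pvB_segment words pad lo hi := by
  have hn : (0 : Int) ≤ (words.length : Int) := by positivity
  by_cases hle : hi ≤ lo
  · rw [PySem.List.pyRange_one_eq_nil hle]
    unfold pvB_segment pvB_clip
    rw [PySem.List.slice_toNat words (by omega) (by omega)]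
    have h1 : (min (max hi 0) (words.length : Int)).toNat - (min (max lo 0) (words.length : Int)).toNat = 0 := by omega
    rw [h1]
    cases pad <;> simp [PySem.List.pyRepeat_singleton]
    constructor <;> omega
  · push_neg at hle
    set n : Int := (words.length : Int) with hndef
    set m1 : Int := min (max lo 0) hi with hm1
    set m2 : Int := min (max lo n) hi with hm2
    rw [PySem.List.pyRange_one_append lo m1 hi (by omega) (by omega),
        PySem.List.pyRange_one_append m1 m2 hi (by omega) (by omega),
        List.filterMap_append, List.filterMap_append]
    -- left part: all indices negative
    have hL : (PySem.List.pyRange lo m1 1).filterMap (pvItem words pad) =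
        (if pad then List.replicate (m1 - lo).toNat "*" else []) := by
      rw [List.filterMap_congr (g := fun _ => if pad then some "*" else none) ?_]
      · rw [pv_filterMap_const]
        cases pad <;> simp [PySem.List.length_pyRange_one]
      · intro j hj
        rw [PySem.List.mem_pyRange_one] at hj
        have : ¬ (0 ≤ j ∧ j < n) := by omega
        simp [pvItem, this, ← hndef]
    -- right part: all indices ≥ n
    have hR : (PySem.List.pyRange m2 hi 1).filterMap (pvItem words pad) =
        (if pad then List.replicate (hi - m2).toNat "*" else []) := by
      rw [List.filterMap_congr (g := fun _ => if pad then some "*" else none) ?_]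
      · rw [pv_filterMap_const]
        cases pad <;> simp [PySem.List.length_pyRange_one]
      · intro j hj
        rw [PySem.List.mem_pyRange_one] at hj
        have : ¬ (0 ≤ j ∧ j < n) := by omega
        simp [pvItem, this, ← hndef]
    -- middle part: all indices in bounds, a drop/take slice
    have hM : (PySem.List.pyRange m1 m2 1).filterMap (pvItem words pad) =
        (words.drop (pvB_clip n lo).toNat).take ((pvB_clip n hi).toNat - (pvB_clip n lo).toNat) := by
      rw [List.filterMap_congr (g := fun j => some (PySem.List.pyGetD words j "")) ?_]
      · rw [show (fun j => some (PySem.List.pyGetD words j "")) = some ∘ (fun j => PySem.List.pyGetD words j "") from rfl,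
            List.filterMap_eq_map]
        by_cases hmm : m1 < m2
        · have h0 : 0 ≤ m1 := by omega
          have hb : m2 ≤ n := by omega
          rw [pv_map_getD_range words m1 m2 h0 (by omega) hb]
          have e1 : m1.toNat = (pvB_clip n lo).toNat := by unfold pvB_clip; omega
          have e2 : m2.toNat = (pvB_clip n hi).toNat := by unfold pvB_clip; omega
          rw [e1, e2]
        · rw [PySem.List.pyRange_one_eq_nil (by omega)]
          have : (pvB_clip n hi).toNat - (pvB_clip n lo).toNat = 0 := by unfold pvB_clip; omega
          rw [this]; simp
      · intro j hj
        rw [PySem.List.mem_pyRange_one] at hj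
        have : 0 ≤ j ∧ j < n := by omega
        simp [pvItem, this, ← hndef]
    rw [hL, hM, hR]
    unfold pvB_segment
    rw [PySem.List.slice_toNat words (by unfold pvB_clip; omega) (by unfold pvB_clip; omega)]
    cases pad
    · simp [← hndef]
    · simp only [if_pos, PySem.List.pyRepeat_singleton]
      have e1 : (m1 - lo).toNat = (max 0 (min hi 0 - lo)).toNat := by omega
      have e2 : (hi - m2).toNat = (max 0 (hi - max lo n)).toNat := by omega
      rw [e1, e2, ← hndef, List.append_assoc]

-- ===== VERDICT (by name: the statement is the Claim_ definition above) =====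
theorem get_window_for_candidate_spec : Claim_equal_get_window_for_candidate := by
  intro post_txt s e ws pad _hdom
  unfold Spec_get_window_for_candidate get_window_for_candidate get_window_for_candidate_alt
  simp only
  rw [get_phrase_from_text_by_offsets, pv_match_eq]
  rw [pvA_winLoop_eq _ s e pad ws.toNat ws rfl 1 _]
  have h1 : s - 1 - ws + 1 = s - ws := by ring
  have h2 : s - 1 + 1 = s := by ring
  rw [h1, h2]
  rw [pv_filterMap_pvItem_eq_segment, pv_filterMap_pvItem_eq_segment,
      pv_filterMap_pvItem_eq_segment]
  have hmatch : pvB_segment (((PySem.Str.split? post_txt " ").getD []).filter (fun w => PySem.Str.len w != 0)) false s (e + 1) =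
      PySem.List.slice (((PySem.Str.split? post_txt " ").getD []).filter (fun w => PySem.Str.len w != 0))
        (some (pvB_clip ((((PySem.Str.split? post_txt " ").getD []).filter (fun w => PySem.Str.len w != 0)).length : Int) s))
        (some (pvB_clip ((((PySem.Str.split? post_txt " ").getD []).filter (fun w => PySem.Str.len w != 0)).length : Int) (e + 1))) := by
    simp [pvB_segment]
  rw [hmatch]
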